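-- pv_equiv track=rewrite | github.com/KyrieEleis0n/dog-api-test-challenge | src/utils/utils.py | get_all_available_breed_endpoints_from_list_all
-- ===== SOURCE A (Python) =====
-- def get_all_available_breed_endpoints_from_list_all(url, list_all_dict):
--     """
--     Given a url, i.e. https://dog.ceo/api, and a JSON formatted python
--     dictionary result from a GET at /breeds/list/all, compile a list of
--     all available endpoints for all breeds and sub-breeds of dogs.
--
--     :param url: The url to attach to the endpoints, i.e. https://dog.ceo/api
--     :type url: str
--     :param list_all_dict: A dictionary with all breeds retrieved from
--                           json.loads(GET(https://dog.ceo/api/breeds/list/all))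
--     :type list_all_dict: dict
--     :return: A compiled list of all available breed and sub-breed endpoints,
--              including /list, /images, /random
--     :rtype: list
--     """
--
--     all_endpoints_list = list()
--     breeds_ep_dct = dict()
--     breeds = list_all_dict['message']
--     for breed in breeds:
--         breed_api = f'{url}/breed/{breed}'
--         breeds_ep_dct[breed_api] = list()
--         if breeds[breed]:
--             for bred in breeds[breed]:
--                 sub_breed_api = bred
--                 if '/list' not in breeds_ep_dct[breed_api]:
--                     breeds_ep_dct[breed_api].append('/list')
--                 img_sub_breed = f'/{sub_breed_api}/images'
--                 breeds_ep_dct[breed_api].append(img_sub_breed)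
--                 img_rand_sub_breed = f'{img_sub_breed}/random'
--                 breeds_ep_dct[breed_api].append(img_rand_sub_breed)
--         else:
--             img_breed = '/images'
--             breeds_ep_dct[breed_api].append(img_breed)
--             img_rand_breed = f'{img_breed}/random'
--             breeds_ep_dct[breed_api].append(img_rand_breed)
--
--     for ep_k in breeds_ep_dct:
--         for ep_v in breeds_ep_dct[ep_k]:
--             all_endpoints_list.append(f'{ep_k}{ep_v}')
--
--     return all_endpoints_list
-- ===== SOURCE B (Python) =====
-- def get_all_available_breed_endpoints_from_list_all(url, list_all_dict):
--     """Single pass: build the endpoint list directly, no intermediate dict."""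
--     all_endpoints_list = []
--     for breed, subs in list_all_dict['message'].items():
--         base = f'{url}/breed/{breed}'
--         if subs:
--             all_endpoints_list += [f'{base}/list'] + [
--                 ep for sub in subs
--                 for ep in (f'{base}/{sub}/images', f'{base}/{sub}/images/random')]
--         else:
--             all_endpoints_list += [f'{base}/images', f'{base}/images/random']
--     return all_endpoints_list
-- ===== Notes on version B (the rewrite author's own statement) =====
-- stated objective: simpler
-- what changed: B drops A's intermediate breed->suffix-list dict (built with membership checks and repeated dict-entry appends, then flattened in a second pass) and emits the full endpoint strings directly in one pass over the breeds dict.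
import Mathlib
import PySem

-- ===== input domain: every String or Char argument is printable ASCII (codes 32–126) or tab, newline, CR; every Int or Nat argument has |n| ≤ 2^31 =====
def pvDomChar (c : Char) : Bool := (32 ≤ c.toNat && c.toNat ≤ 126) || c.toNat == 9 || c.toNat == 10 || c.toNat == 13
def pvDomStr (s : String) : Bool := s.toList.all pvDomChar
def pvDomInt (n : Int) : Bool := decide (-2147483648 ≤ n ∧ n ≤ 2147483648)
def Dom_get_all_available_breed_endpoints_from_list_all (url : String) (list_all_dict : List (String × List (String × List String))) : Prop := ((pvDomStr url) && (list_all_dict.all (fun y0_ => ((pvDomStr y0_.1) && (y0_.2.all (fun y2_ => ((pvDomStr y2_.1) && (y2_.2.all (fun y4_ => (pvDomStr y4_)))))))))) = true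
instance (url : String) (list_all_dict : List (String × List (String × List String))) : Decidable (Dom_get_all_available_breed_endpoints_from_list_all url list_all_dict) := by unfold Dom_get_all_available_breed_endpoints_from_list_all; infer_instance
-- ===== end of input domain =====

-- B builds the endpoint list in one pass over the breeds dict, dropping A's intermediate
-- suffix-table dict and its second flattening pass (objective: simpler).


-- ===== PORT A =====
-- inner loop body of A: per sub-breed, append '/list' (once), '/<sub>/images', '/<sub>/images/random'
def pvStepSub (breed_api : String) (d : PySem.Dict String (List String)) (bred : String) : PySem.Dict String (List String) :=
  let d := if "/list" ∈ d.getD breed_api [] then d else d.modify breed_api [] (· ++ ["/list"])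
  let d := d.modify breed_api [] (· ++ ["/" ++ bred ++ "/images"])
  d.modify breed_api [] (· ++ ["/" ++ bred ++ "/images/random"])

-- outer loop body of A: one breed's contribution to breeds_ep_dct
def pvStepBreed (url : String) (breeds : PySem.Dict String (List String)) (d : PySem.Dict String (List String)) (breed : String) : PySem.Dict String (List String) :=
  let breed_api := url ++ "/breed/" ++ breed
  let d := d.insert breed_api []
  match breeds.getD breed [] with
  | [] =>
    let d := d.modify breed_api [] (· ++ ["/images"])
    d.modify breed_api [] (· ++ ["/images/random"])
  | sub :: rest => (sub :: rest).foldl (pvStepSub breed_api) d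

def get_all_available_breed_endpoints_from_list_all (url : String) (list_all_dict : List (String × List (String × List String))) : List String :=
  match (PySem.Dict.ofList list_all_dict).get? "message" with
  | none => []  -- Python A raises KeyError here; excluded by Pre_
  | some breeds_list =>
    let breeds := PySem.Dict.ofList breeds_list
    let breeds_ep_dct := breeds.keys.foldl (pvStepBreed url breeds) PySem.Dict.empty
    breeds_ep_dct.keys.foldl (fun acc ep_k =>
      (breeds_ep_dct.getD ep_k []).foldl (fun acc ep_v => acc ++ [ep_k ++ ep_v]) acc) []

-- ===== PORT B =====
def get_all_available_breed_endpoints_from_list_all_alt (url : String) (list_all_dict : List (String × List (String × List String))) : List String :=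
  match (PySem.Dict.ofList list_all_dict).get? "message" with
  | none => []  -- Python B raises KeyError here; excluded by Pre_
  | some breeds_list =>
    (PySem.Dict.ofList breeds_list).items.flatMap (fun p =>
      let base := url ++ "/breed/" ++ p.1
      match p.2 with
      | [] => [base ++ "/images", base ++ "/images/random"]
      | subs => (base ++ "/list") ::
          subs.flatMap (fun sub => [base ++ "/" ++ sub ++ "/images", base ++ "/" ++ sub ++ "/images/random"]))

-- ===== PRECONDITION & SPEC =====
-- Pre_ excludes exactly the dicts without a 'message' key, on which Python A (and B) raise KeyError.
def Pre_get_all_available_breed_endpoints_from_list_all (url : String) (list_all_dict : List (String × List (String × List String))) : Prop :=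
  (PySem.Dict.ofList list_all_dict).contains "message" = true
instance (url : String) (list_all_dict : List (String × List (String × List String))) : Decidable (Pre_get_all_available_breed_endpoints_from_list_all url list_all_dict) := by unfold Pre_get_all_available_breed_endpoints_from_list_all; infer_instance

def pvWitness_get_all_available_breed_endpoints_from_list_all : String × (List (String × List (String × List String))) :=
  ("https://dog.ceo/api", [("message", [("hound", ["afghan", "basset"]), ("pug", [])])])

def Spec_get_all_available_breed_endpoints_from_list_all (url : String) (list_all_dict : List (String × List (String × List String))) (out : List String) : Prop := out = get_all_available_breed_endpoints_from_list_all_alt url list_all_dict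
instance (url : String) (list_all_dict : List (String × List (String × List String))) (out : List String) : Decidable (Spec_get_all_available_breed_endpoints_from_list_all url list_all_dict out) := by unfold Spec_get_all_available_breed_endpoints_from_list_all; infer_instance

-- ===== CLAIM (what is proved, stated in full; the proofs are below) =====
def Claim_equal_get_all_available_breed_endpoints_from_list_all : Prop := ∀ (url : String) (list_all_dict : List (String × List (String × List String))), Dom_get_all_available_breed_endpoints_from_list_all url list_all_dict → Pre_get_all_available_breed_endpoints_from_list_all url list_all_dict → Spec_get_all_available_breed_endpoints_from_list_all url list_all_dict (get_all_available_breed_endpoints_from_list_all url list_all_dict)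

-- ===== LEMMAS AND PROOFS =====

-- the endpoint suffix list A accumulates in breeds_ep_dct for one breed
def pvEntry (subs : List String) : List String :=
  match subs with
  | [] => ["/images", "/images/random"]
  | _ => "/list" :: subs.flatMap (fun s => ["/" ++ s ++ "/images", "/" ++ s ++ "/images/random"])

def pvKey (url b : String) : String := url ++ "/breed/" ++ b

theorem pvKey_injective (url : String) : Function.Injective (pvKey url) := by
  intro a b h
  unfold pvKey at h
  have h2 : (url ++ "/breed/" ++ a).toList = (url ++ "/breed/" ++ b).toList := congrArg String.toList h
  simp only [String.toList_append] at h2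
  exact String.toList_inj.mp (List.append_cancel_left h2)

theorem pv_inner_fold (subs : List String) :
    ∀ (d : PySem.Dict String (List String)) (api : String) (e : List String), "/list" ∈ e →
    subs.foldl (pvStepSub api) (d.insert api e)
      = d.insert api (e ++ subs.flatMap (fun s => ["/" ++ s ++ "/images", "/" ++ s ++ "/images/random"])) := by
  induction subs with
  | nil => intro d api e he; simp
  | cons s rest ih =>
    intro d api e he
    have hstep : pvStepSub api (d.insert api e) s
        = d.insert api (e ++ ["/" ++ s ++ "/images", "/" ++ s ++ "/images/random"]) := by
      unfold pvStepSub
      simp only [PySem.Dict.getD_insert_self, if_pos he, PySem.Dict.modify,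
        PySem.Dict.insert_insert_self]
      simp
    rw [List.foldl_cons, hstep, ih _ _ _ (by simp [he])]
    simp

theorem pv_step_breed (url : String) (breeds : PySem.Dict String (List String))
    (d : PySem.Dict String (List String)) (breed : String) :
    pvStepBreed url breeds d breed = d.insert (pvKey url breed) (pvEntry (breeds.getD breed [])) := by
  cases h : breeds.getD breed [] with
  | nil =>
    simp only [pvStepBreed, pvKey, h]
    simp only [pvEntry, PySem.Dict.modify, PySem.Dict.getD_insert_self,
      PySem.Dict.insert_insert_self]
    simp
  | cons s rest =>
    simp only [pvStepBreed, pvKey, h]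
    have hfirst : pvStepSub (url ++ "/breed/" ++ breed) ((d.insert (url ++ "/breed/" ++ breed) [])) s
        = d.insert (url ++ "/breed/" ++ breed) ["/list", "/" ++ s ++ "/images", "/" ++ s ++ "/images/random"] := by
      simp [pvStepSub, PySem.Dict.modify, PySem.Dict.insert_insert_self,
        PySem.Dict.getD_insert_self]
    rw [List.foldl_cons, hfirst, pv_inner_fold rest _ _ _ (by simp)]
    simp [pvEntry]

theorem pv_flatten (dd : PySem.Dict String (List String)) (hnd : dd.keys.Nodup) :
    dd.keys.foldl (fun acc ep_k => (dd.getD ep_k []).foldl (fun acc ep_v => acc ++ [ep_k ++ ep_v]) acc) []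
      = dd.items.flatMap (fun p => p.2.map (fun v => p.1 ++ v)) := by
  simp only [PySem.List.foldl_append_singleton_eq_map]
  rw [PySem.List.foldl_append_eq_flatMap (fun k => (dd.getD k []).map (fun v => k ++ v))]
  rw [PySem.Dict.items_eq_map_keys dd hnd []]
  simp [List.flatMap_map]

theorem pv_perpair (url b : String) (subs : List String) :
    (let base := url ++ "/breed/" ++ b
     match subs with
     | [] => [base ++ "/images", base ++ "/images/random"]
     | subs => (base ++ "/list") ::
         subs.flatMap (fun sub => [base ++ "/" ++ sub ++ "/images", base ++ "/" ++ sub ++ "/images/random"]))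
      = (pvEntry subs).map (fun v => pvKey url b ++ v) := by
  cases subs with
  | nil => simp [pvEntry, pvKey]
  | cons s rest =>
    simp [pvEntry, pvKey, List.map_flatMap, String.append_assoc]

-- ===== VERDICT (by name: the statement is the Claim_ definition above) =====
theorem get_all_available_breed_endpoints_from_list_all_spec : Claim_equal_get_all_available_breed_endpoints_from_list_all := by
  intro url l _ _
  unfold Spec_get_all_available_breed_endpoints_from_list_all
  unfold get_all_available_breed_endpoints_from_list_all get_all_available_breed_endpoints_from_list_all_alt
  cases hm : (PySem.Dict.ofList l).get? "message" with
  | none => rfl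
  | some breeds_list =>
    simp only []
    have hnodup := PySem.Dict.nodup_keys_ofList breeds_list
    set breeds := PySem.Dict.ofList breeds_list with hb
    have hfun : pvStepBreed url breeds
        = fun d b => d.insert (pvKey url b) (pvEntry (breeds.getD b [])) :=
      funext fun d => funext fun b => pv_step_breed url breeds d b
    rw [hfun]
    have hitems := PySem.Dict.items_foldl_insert_fresh breeds.keys (pvKey url)
      (fun b => pvEntry (breeds.getD b [])) PySem.Dict.empty
      (fun a _ => by simp) (hnodup.map (pvKey_injective url))
    have hemp : (PySem.Dict.empty : PySem.Dict String (List String)).items = [] := rfl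
    simp only [hemp, List.nil_append] at hitems
    set dct := breeds.keys.foldl (fun d b => d.insert (pvKey url b) (pvEntry (breeds.getD b []))) PySem.Dict.empty with hd
    have hknd : dct.keys.Nodup := by
      have hkeys : dct.keys = breeds.keys.map (pvKey url) := by
        show dct.items.map (fun x => x.1) = _
        rw [hitems, List.map_map]
        rfl
      rw [hkeys]; exact hnodup.map (pvKey_injective url)
    rw [pv_flatten dct hknd, hitems]
    rw [PySem.Dict.items_eq_map_keys breeds hnodup []]
    simp only [List.flatMap_map]
    exact List.flatMap_congr (fun b _ => (pv_perpair url b (breeds.getD b [])).symm)
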